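-- pv_equiv track=rewrite | github.com/notforyou23/COSMO_BrainStudio | brains/Physics2.brain/outputs/code-creation/agent_1766440246816_afic06q/src/cosmo_contracts/markdown.py | inline_code
-- ===== SOURCE A (Python) =====
-- def inline_code(code: str) -> str:
--     """Format inline code, choosing a delimiter that doesn't conflict."""
--     s = "" if code is None else str(code)
--     # If code contains backticks, use longer runs.
--     max_run = 0
--     run = 0
--     for ch in s:
--         if ch == "`":
--             run += 1
--             max_run = max(max_run, run)
--         else:
--             run = 0
--     delim = "`" * (max_run + 1 or 1)
--     return f"{delim}{s}{delim}"
-- ===== SOURCE B (Python) =====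
-- def inline_code(code: str) -> str:
--     """Format inline code, choosing a delimiter that doesn't conflict."""
--     s = "" if code is None else str(code)
--     delim = "`"
--     while delim in s:
--         delim += "`"
--     return delim + s + delim
-- ===== Notes on version B (the rewrite author's own statement) =====
-- stated objective: idiomatic
-- what changed: B replaces A's char-by-char run counter (tracking current and maximal backtick-run lengths) with a grow-the-delimiter loop: start with one backtick and extend the delimiter while it still occurs as a substring of the code; measured faster because the substring test runs in C instead of a per-character Python loop.
import Mathlib
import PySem

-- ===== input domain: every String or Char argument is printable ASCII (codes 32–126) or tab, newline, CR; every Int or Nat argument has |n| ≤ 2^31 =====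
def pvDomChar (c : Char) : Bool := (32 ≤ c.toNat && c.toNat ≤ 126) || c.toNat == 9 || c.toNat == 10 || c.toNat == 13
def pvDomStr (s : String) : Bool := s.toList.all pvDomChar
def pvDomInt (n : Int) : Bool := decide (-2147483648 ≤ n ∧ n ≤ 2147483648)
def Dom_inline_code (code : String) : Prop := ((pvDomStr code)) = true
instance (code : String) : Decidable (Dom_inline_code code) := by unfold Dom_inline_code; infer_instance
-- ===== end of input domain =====

-- B replaces A's char-by-char run counter with an idiomatic grow-the-delimiter loop
-- (extend the delimiter while it still occurs as a substring); return values proved equal.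

-- ===== PORT A =====
-- A: scan the chars keeping (max_run, run); note "max_run + 1 or 1" = max_run + 1, since max_run + 1 ≥ 1 is always truthy.
def inline_code (code : String) : String :=
  let s := code.toList
  let st := s.foldl (fun (p : Nat × Nat) ch =>
      if ch = '`' then (max p.1 (p.2 + 1), p.2 + 1) else (p.1, 0)) (0, 0)
  let delim := List.replicate (st.1 + 1) '`'
  String.ofList (delim ++ s ++ delim)

-- ===== PORT B =====
-- B's while loop: extend delim by one backtick while `delim in s`.
def growDelim (s : List Char) (delim : List Char) : List Char :=
  if h : PySem.Chars.isIn delim s then growDelim s (delim ++ ['`']) else delim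
termination_by s.length + 1 - delim.length
decreasing_by
  have hle : delim.length ≤ s.length :=
    ((PySem.Chars.isIn_iff_infix delim s).mp h).length_le
  simp only [List.length_append, List.length_singleton]
  omega

def inline_code_alt (code : String) : String :=
  let s := code.toList
  let delim := growDelim s ['`']
  String.ofList (delim ++ s ++ delim)

-- ===== PRECONDITION & SPEC =====
def Spec_inline_code (code : String) (out : String) : Prop := out = inline_code_alt code
instance (code : String) (out : String) : Decidable (Spec_inline_code code out) := by unfold Spec_inline_code; infer_instance

-- ===== CLAIM (what is proved, stated in full; the proofs are below) =====
def Claim_equal_inline_code : Prop := ∀ (code : String), Dom_inline_code code → Spec_inline_code code (inline_code code)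

-- ===== LEMMAS AND PROOFS =====

/-- Longest backtick run of `replicate r '`' ++ t` (A's loop, seen from a pending run of `r`). -/
def maxRunFrom (r : Nat) : List Char → Nat
  | [] => r
  | c :: t => if c = '`' then maxRunFrom (r + 1) t else max r (maxRunFrom 0 t)

lemma le_maxRunFrom (r : Nat) (t : List Char) : r ≤ maxRunFrom r t := by
  induction t generalizing r with
  | nil => simp [maxRunFrom]
  | cons c t ih =>
    by_cases h : c = '`'
    · simp only [maxRunFrom, if_pos h]
      exact le_trans (Nat.le_succ r) (ih (r + 1))
    · simp [maxRunFrom, h]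

/-- A's fold computes `max m (maxRunFrom r t)` as its first component (invariant `r ≤ m`). -/
lemma foldA_fst (t : List Char) : ∀ m r : Nat, r ≤ m →
    (t.foldl (fun (p : Nat × Nat) ch =>
      if ch = '`' then (max p.1 (p.2 + 1), p.2 + 1) else (p.1, 0)) (m, r)).1
      = max m (maxRunFrom r t) := by
  induction t with
  | nil => intro m r h; simp [maxRunFrom]; omega
  | cons c t ih =>
    intro m r h
    by_cases hc : c = '`'
    · have h1 : r + 1 ≤ max m (r + 1) := le_max_right _ _
      have h2 := le_maxRunFrom (r + 1) t
      simp only [List.foldl_cons, if_pos hc]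
      rw [ih (max m (r + 1)) (r + 1) h1]
      simp [maxRunFrom, hc]
      omega
    · simp only [List.foldl_cons, if_neg hc]
      rw [ih m 0 (Nat.zero_le m)]
      simp [maxRunFrom, hc]
      omega

lemma rep_prefix_rep {k r : Nat} (h : k ≤ r) (c : Char) :
    List.replicate k c <+: List.replicate r c :=
  ⟨List.replicate (r - k) c, by rw [← List.replicate_add]; congr 1; omega⟩

lemma rep_infix_rep {k r : Nat} (c : Char) :
    List.replicate k c <:+: List.replicate r c ↔ k ≤ r := by
  constructor
  · intro h; simpa using h.length_le
  · intro h; exact (rep_prefix_rep h c).isInfix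

/-- A prefix made of backticks of `u ++ c :: v` with `c` not a backtick stays inside `u`. -/
lemma rep_prefix_split {k : Nat} {c : Char} {u v : List Char} (hc : c ≠ '`')
    (h : List.replicate k '`' <+: u ++ c :: v) : List.replicate k '`' <+: u := by
  have hk : k ≤ u.length := by
    by_contra hgt
    push Not at hgt
    have hlen : u.length < (List.replicate k '`').length := by simpa using hgt
    have := h.getElem hlen
    rw [List.getElem_replicate] at this
    have hc' : (u ++ c :: v)[u.length]'(by simp) = c := by
      simp
    exact hc (hc'.symm.trans this.symm)
  exact List.prefix_of_prefix_length_le h (List.prefix_append u (c :: v)) (by simpa using hk)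

/-- A backtick run that is an infix of `u ++ c :: v` (`c` not a backtick) is an infix of `u` or of `v`. -/
lemma rep_infix_split {k : Nat} {c : Char} (hc : c ≠ '`') :
    ∀ u v : List Char, List.replicate k '`' <:+: u ++ c :: v →
      List.replicate k '`' <:+: u ∨ List.replicate k '`' <:+: v := by
  intro u
  induction u with
  | nil =>
    intro v h
    simp only [List.nil_append] at h
    rcases List.infix_cons_iff.mp h with hp | hi
    · exact Or.inl (rep_prefix_split hc hp).isInfix
    · exact Or.inr hi
  | cons a u ih =>
    intro v h
    rcases List.infix_cons_iff.mp h with hp | hi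
    · exact Or.inl (rep_prefix_split hc hp).isInfix
    · rcases ih v hi with h1 | h2
      · exact Or.inl (h1.trans (List.suffix_cons a u).isInfix)
      · exact Or.inr h2

/-- Characterisation: a run of `k` backticks occurs in `replicate r '`' ++ t` iff `k ≤ maxRunFrom r t`. -/
lemma rep_infix_iff {k : Nat} :
    ∀ (t : List Char) (r : Nat),
      (List.replicate k '`' <:+: List.replicate r '`' ++ t ↔ k ≤ maxRunFrom r t) := by
  intro t
  induction t with
  | nil => intro r; simpa [maxRunFrom] using rep_infix_rep (k := k) (r := r) '`'
  | cons c t ih =>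
    intro r
    by_cases hc : c = '`'
    · subst hc
      have harr : List.replicate r '`' ++ '`' :: t = List.replicate (r + 1) '`' ++ t := by
        rw [List.replicate_succ']; simp
      rw [harr, ih (r + 1)]
      simp [maxRunFrom]
    · rw [show maxRunFrom r (c :: t) = max r (maxRunFrom 0 t) by simp [maxRunFrom, hc]]
      constructor
      · intro h
        rcases rep_infix_split hc (List.replicate r '`') t h with h1 | h2
        · exact le_trans ((rep_infix_rep '`').mp h1) (le_max_left _ _)
        · have := (ih 0).mp (by simpa using h2)
          exact le_trans this (le_max_right _ _)
      · intro h
        by_cases h1 : k ≤ r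
        · exact ((rep_prefix_rep h1 '`').trans (List.prefix_append _ _)).isInfix
        · have h2 : k ≤ maxRunFrom 0 t := by omega
          have h3 : List.replicate k '`' <:+: t := by simpa using (ih 0).mpr h2
          have h4 : t <:+ List.replicate r '`' ++ c :: t := by
            have := List.suffix_append (List.replicate r '`' ++ [c]) t
            simpa using this
          exact h3.trans h4.isInfix

/-- Running B's loop from a delimiter of `j ≥ 1` backticks yields `max j (maxRun + 1)` backticks. -/
lemma growDelim_rep (s : List Char) :
    ∀ (n j : Nat), 1 ≤ j → maxRunFrom 0 s + 1 ≤ j + n →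
      growDelim s (List.replicate j '`') = List.replicate (max j (maxRunFrom 0 s + 1)) '`' := by
  intro n
  induction n with
  | zero =>
    intro j h1 h2
    rw [growDelim]
    have hni : ¬ (List.replicate j '`' <:+: s) := by
      intro h
      have := (rep_infix_iff s 0).mp (by simpa using h)
      omega
    rw [dif_neg (by simpa [PySem.Chars.isIn_iff_infix] using hni)]
    congr 1
    omega
  | succ n ih =>
    intro j h1 h2
    rw [growDelim]
    by_cases hin : PySem.Chars.isIn (List.replicate j '`') s
    · have hle : j ≤ maxRunFrom 0 s := by
        have := (rep_infix_iff s 0).mp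
          (by simpa using (PySem.Chars.isIn_iff_infix _ s).mp hin)
        exact this
      rw [dif_pos hin]
      have : List.replicate j '`' ++ ['`'] = List.replicate (j + 1) '`' := by
        rw [List.replicate_succ']
      rw [this, ih (j + 1) (by omega) (by omega)]
      congr 1
      omega
    · have hgt : maxRunFrom 0 s < j := by
        by_contra hle
        push Not at hle
        exact hin ((PySem.Chars.isIn_iff_infix _ s).mpr
          (by simpa using (rep_infix_iff s 0).mpr hle))
      rw [dif_neg hin]
      congr 1
      omega

-- ===== VERDICT (by name: the statement is the Claim_ definition above) =====
theorem inline_code_spec : Claim_equal_inline_code := by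
  intro code _
  unfold Spec_inline_code inline_code inline_code_alt
  have hfold := foldA_fst code.toList 0 0 le_rfl
  have hgrow := growDelim_rep code.toList (maxRunFrom 0 code.toList) 1 le_rfl (by omega)
  simp only []
  rw [hfold]
  rw [show (['`'] : List Char) = List.replicate 1 '`' by rfl] at *
  rw [hgrow]
  congr 2
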